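-- pv_equiv track=rewrite | github.com/AlexandraKulikova/course-2130 | python/homework_1/template.py | t8
-- ===== SOURCE A (Python) =====
-- def t8(string):
--     """
--     Найдите все последовательности числев в строке и среди них найдите максимальное число
--
--     gh12cdy695m1 -> 695
--     """
--     nums = []
--     i = 0
--     while i < len(string):
--         snum = ""
--         a = string[i]
--         while "0" <= a <= "9":
--             snum += a
--             i += 1
--             if i < len(string):
--                 a = string[i]
--             else:
--                 break
--         i += 1
--         if snum != "":
--             nums.append(int(snum))
--     return max(nums)
-- ===== SOURCE B (Python) =====
-- def t8(string):
--     # normalize: keep ASCII digits, blank out everything else; split into maximal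
--     # digit runs; reduce with max (raises ValueError when there is no digit, like A)
--     cleaned = "".join(c if "0" <= c <= "9" else " " for c in string)
--     return max(int(tok) for tok in cleaned.split())
-- ===== Notes on version B (the rewrite author's own statement) =====
-- stated objective: simpler
-- what changed: Replaces the index-driven two-level while-loop FSM with a normalize-tokenize-reduce pipeline: map non-digits to spaces, split() into maximal digit runs, take max of their int values.
import Mathlib
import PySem

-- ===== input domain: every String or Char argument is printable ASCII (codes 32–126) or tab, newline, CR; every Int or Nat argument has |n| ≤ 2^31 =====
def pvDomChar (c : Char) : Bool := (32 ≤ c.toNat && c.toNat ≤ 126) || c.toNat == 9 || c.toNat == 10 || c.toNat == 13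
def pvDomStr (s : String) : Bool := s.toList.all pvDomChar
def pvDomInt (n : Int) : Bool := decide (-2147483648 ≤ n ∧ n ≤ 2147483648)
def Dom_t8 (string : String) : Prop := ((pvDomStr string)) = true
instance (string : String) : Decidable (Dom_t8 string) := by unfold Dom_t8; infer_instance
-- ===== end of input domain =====

-- B replaces A's index-driven two-level while-loop FSM by a normalize / split() / max pipeline (objective: simpler).

-- ===== PORT A =====
-- inner `while "0" <= a <= "9"` loop: collects the digit run into snum, returns the unread rest
def t8take (cs : List Char) (snum : List Char) : List Char × List Char :=
  match cs with
  | [] => (snum, [])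
  | a :: rest => if '0' ≤ a ∧ a ≤ '9' then t8take rest (snum ++ [a]) else (snum, a :: rest)

-- needed by t8loop's termination proof
theorem t8take_snd_le (cs : List Char) : ∀ snum, (t8take cs snum).2.length ≤ cs.length := by
  induction cs with
  | nil => intro snum; simp [t8take]
  | cons a rest ih =>
    intro snum
    by_cases h : '0' ≤ a ∧ a ≤ '9'
    · simp only [t8take, if_pos h]
      exact Nat.le_trans (ih _) (Nat.le_succ _)
    · simp [t8take, if_neg h]

-- outer `while i < len(string)` loop; the trailing `i += 1` is `.tail` of the unread rest
def t8loop (cs : List Char) (nums : List Int) : List Int :=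
  match cs with
  | [] => nums
  | a :: rest =>
    let p := t8take (a :: rest) []
    let nums' := if p.1 ≠ [] then nums ++ [(PySem.Int.ofChars? p.1).getD 0] else nums
    t8loop p.2.tail nums'
termination_by cs.length
decreasing_by
  have h := t8take_snd_le (a :: rest) []
  have h2 : (t8take (a :: rest) []).2.tail.length ≤ (t8take (a :: rest) []).2.length - 1 := by
    simp [List.length_tail]
  simp only [List.length_cons] at *
  omega

def t8 (string : String) : Int :=
  match PySem.List.max? (t8loop string.toList []) (fun x => x) with
  | some m => m
  | none => 0  -- unreachable under Pre_t8: Python's max([]) raises ValueError there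

-- ===== PORT B =====
-- `"".join(c if "0" <= c <= "9" else " " for c in string)` — a join of 1-char strings is the char list itself (exact)
def t8norm (cs : List Char) : List Char := cs.map (fun c => if '0' ≤ c ∧ c ≤ '9' then c else ' ')

def t8_alt (string : String) : Int :=
  let toks := PySem.Chars.split₀ (t8norm string.toList)
  match PySem.List.max? (toks.map (fun t => (PySem.Int.ofChars? t).getD 0)) (fun x => x) with
  | some m => m
  | none => 0  -- unreachable under Pre_t8: Python's max of an empty generator raises ValueError there

-- ===== PRECONDITION & SPEC =====
-- Pre_ excludes exactly the strings containing no ASCII digit: there both A and B raise ValueError (max of an empty sequence).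
def Pre_t8 (string : String) : Prop := string.toList.any (fun c => decide ('0' ≤ c ∧ c ≤ '9')) = true
instance (string : String) : Decidable (Pre_t8 string) := by unfold Pre_t8; infer_instance
def pvWitness_t8 : String := "gh12cdy695m1"

def Spec_t8 (string : String) (out : Int) : Prop := out = t8_alt string
instance (string : String) (out : Int) : Decidable (Spec_t8 string out) := by unfold Spec_t8; infer_instance

-- ===== CLAIM (what is proved, stated in full; the proofs are below) =====
def Claim_equal_t8 : Prop := ∀ (string : String), Dom_t8 string → Pre_t8 string → Spec_t8 string (t8 string)

-- ===== LEMMAS AND PROOFS =====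

-- the list of maximal digit runs of cs: the reference object both ports are reduced to
def pvRuns (cs : List Char) : List (List Char) :=
  match cs with
  | [] => []
  | a :: rest =>
    if ('0' ≤ a ∧ a ≤ '9') then
      (a :: rest.takeWhile (fun c => decide ('0' ≤ c ∧ c ≤ '9'))) ::
        pvRuns (rest.dropWhile (fun c => decide ('0' ≤ c ∧ c ≤ '9')))
    else pvRuns rest
termination_by cs.length
decreasing_by
  · have := List.length_dropWhile_le (p := fun c => decide ('0' ≤ c ∧ c ≤ '9')) (l := rest)
    simp only [List.length_cons]; omega
  · simp

theorem t8take_eq (cs : List Char) : ∀ snum, t8take cs snum =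
    (snum ++ cs.takeWhile (fun c => decide ('0' ≤ c ∧ c ≤ '9')),
     cs.dropWhile (fun c => decide ('0' ≤ c ∧ c ≤ '9'))) := by
  induction cs with
  | nil => intro snum; simp [t8take]
  | cons a rest ih =>
    intro snum
    by_cases h : '0' ≤ a ∧ a ≤ '9'
    · simp [t8take, h, ih]
    · simp [t8take, h]

theorem isspace_of_digit (c : Char) (h : '0' ≤ c ∧ c ≤ '9') : PySem.Chars.isspace c = false := by
  obtain ⟨h1, h2⟩ := h
  rw [Char.le_def] at h1 h2
  have n1 : (48 : Nat) ≤ c.toNat := h1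
  have n2 : c.toNat ≤ 57 := h2
  simp only [PySem.Chars.isspace]
  simp only [Bool.or_eq_false_iff, Bool.and_eq_false_iff, decide_eq_false_iff_not]
  omega

theorem go_norm (cs : List Char) : ∀ cur acc, PySem.Chars.split₀.go (t8norm cs) cur acc =
    acc.reverse ++ (if cur = [] then pvRuns cs
      else (cur.reverse ++ cs.takeWhile (fun c => decide ('0' ≤ c ∧ c ≤ '9'))) ::
        pvRuns (cs.dropWhile (fun c => decide ('0' ≤ c ∧ c ≤ '9')))) := by
  induction cs with
  | nil =>
    intro cur acc
    by_cases h : cur = []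
    · simp [t8norm, PySem.Chars.split₀.go, pvRuns, h]
    · simp [t8norm, PySem.Chars.split₀.go, pvRuns, h, List.isEmpty_iff]
  | cons a rest ih =>
    intro cur acc
    by_cases hd : '0' ≤ a ∧ a ≤ '9'
    · have hs := isspace_of_digit a hd
      have h1 : t8norm (a :: rest) = a :: t8norm rest := by simp [t8norm, hd]
      rw [h1, PySem.Chars.split₀.go, hs]
      simp only [Bool.false_eq_true, if_false]
      rw [ih (a :: cur) acc]
      by_cases h : cur = []
      · subst h
        simp [pvRuns, hd]
      · simp [h, hd]
    · have h1 : t8norm (a :: rest) = ' ' :: t8norm rest := by simp [t8norm, hd]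
      rw [h1, PySem.Chars.split₀.go]
      have hs : PySem.Chars.isspace ' ' = true := by decide
      rw [hs]
      simp only [if_true]
      by_cases h : cur = []
      · subst h
        simp only [List.isEmpty_nil, if_true]
        rw [ih [] acc]
        simp [pvRuns, hd]
      · rw [if_neg (by simpa [List.isEmpty_iff] using h)]
        rw [ih [] (cur.reverse :: acc)]
        simp [pvRuns, hd, h]

theorem split_norm (cs : List Char) : PySem.Chars.split₀ (t8norm cs) = pvRuns cs := by
  have := go_norm cs [] []
  simpa [PySem.Chars.split₀] using this

theorem pvRuns_tail_dropWhile (rest : List Char) :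
    pvRuns ((rest.dropWhile (fun c => decide ('0' ≤ c ∧ c ≤ '9'))).tail)
      = pvRuns (rest.dropWhile (fun c => decide ('0' ≤ c ∧ c ≤ '9'))) := by
  cases hd : rest.dropWhile (fun c => decide ('0' ≤ c ∧ c ≤ '9')) with
  | nil => simp
  | cons c t =>
    have hc : ¬ ('0' ≤ c ∧ c ≤ '9') := by
      have hh := List.head?_dropWhile_not (p := fun c => decide ('0' ≤ c ∧ c ≤ '9')) (l := rest)
      rw [hd] at hh
      simpa using hh
    simp [pvRuns, hc]

theorem t8loop_eq (n : Nat) : ∀ (cs : List Char), cs.length ≤ n → ∀ nums,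
    t8loop cs nums = nums ++ (pvRuns cs).map (fun t => (PySem.Int.ofChars? t).getD 0) := by
  induction n with
  | zero =>
    intro cs hcs nums
    have : cs = [] := by cases cs <;> simp_all
    subst this
    simp [t8loop, pvRuns]
  | succ n ih =>
    intro cs hcs nums
    cases cs with
    | nil => simp [t8loop, pvRuns]
    | cons a rest =>
      rw [t8loop]
      simp only [t8take_eq]
      by_cases hd : '0' ≤ a ∧ a ≤ '9'
      · simp only [List.takeWhile_cons, List.dropWhile_cons, hd, and_self, decide_true,
          if_true, List.nil_append, ne_eq, reduceCtorEq, not_false_eq_true]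
        have hlen : ((rest.dropWhile (fun c => decide ('0' ≤ c ∧ c ≤ '9'))).tail).length ≤ n := by
          have h1 := List.length_dropWhile_le (p := fun c => decide ('0' ≤ c ∧ c ≤ '9')) (l := rest)
          have h2 := List.length_tail (l := rest.dropWhile (fun c => decide ('0' ≤ c ∧ c ≤ '9')))
          simp only [List.length_cons] at hcs
          omega
        rw [ih _ hlen]
        rw [pvRuns_tail_dropWhile]
        have : pvRuns (a :: rest) =
            (a :: rest.takeWhile (fun c => decide ('0' ≤ c ∧ c ≤ '9'))) ::
              pvRuns (rest.dropWhile (fun c => decide ('0' ≤ c ∧ c ≤ '9'))) := by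
          rw [pvRuns]; simp [hd]
        rw [this]
        simp
      · simp only [List.takeWhile_cons, List.dropWhile_cons, hd, decide_false,
          Bool.false_eq_true, if_false, List.nil_append, ne_eq, not_true_eq_false,
          List.tail_cons]
        have hlen : rest.length ≤ n := by simp only [List.length_cons] at hcs; omega
        rw [ih _ hlen]
        have : pvRuns (a :: rest) = pvRuns rest := by rw [pvRuns]; simp [hd]
        rw [this]

-- ===== VERDICT (by name: the statement is the Claim_ definition above) =====
theorem t8_spec : Claim_equal_t8 := by
  intro s _ _
  unfold Spec_t8 t8 t8_alt
  rw [split_norm, t8loop_eq s.toList.length s.toList (Nat.le_refl _) []]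
  simp
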